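-- pv_equiv track=rewrite | github.com/punkyfer/uva-programming-challenges | tema4/shellsort.py | calculate_to_move
-- ===== SOURCE A (Python) =====
-- def calculate_to_move(case):
--     case_copy = [case[0][::-1], case[1][::-1]]
--     to_move = []
--     mod0 = 0
--     for x in range(len(case_copy[1])):
--         try:
--             if case_copy[0][x+mod0] != case_copy[1][x]:
--                 while(case_copy[0][x+mod0] != case_copy[1][x]):
--                     to_move.append(case_copy[0][x+mod0])
--                     mod0+=1
--         except IndexError:
--             break
--     return to_move
-- ===== SOURCE B (Python) =====
-- def calculate_to_move(case):
--     def go(rev0, rev1):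
--         if not rev1:
--             return []
--         t = rev1[0]
--         if t in rev0:
--             k = rev0.index(t)
--             return rev0[:k] + go(rev0[k + 1:], rev1[1:])
--         return rev0
--     return go(case[0][::-1], case[1][::-1])
-- ===== Notes on version B (the rewrite author's own statement) =====
-- stated objective: alternative
-- what changed: Replaces A's index loop with try/except, inner while and mod0 offset accumulator by a recursive decomposition: for each target take rev0 up to its first occurrence (found by membership + .index), concatenate, and recurse on the slice after the match; no pointers, no accumulator, no exception handling.
import Mathlib
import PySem

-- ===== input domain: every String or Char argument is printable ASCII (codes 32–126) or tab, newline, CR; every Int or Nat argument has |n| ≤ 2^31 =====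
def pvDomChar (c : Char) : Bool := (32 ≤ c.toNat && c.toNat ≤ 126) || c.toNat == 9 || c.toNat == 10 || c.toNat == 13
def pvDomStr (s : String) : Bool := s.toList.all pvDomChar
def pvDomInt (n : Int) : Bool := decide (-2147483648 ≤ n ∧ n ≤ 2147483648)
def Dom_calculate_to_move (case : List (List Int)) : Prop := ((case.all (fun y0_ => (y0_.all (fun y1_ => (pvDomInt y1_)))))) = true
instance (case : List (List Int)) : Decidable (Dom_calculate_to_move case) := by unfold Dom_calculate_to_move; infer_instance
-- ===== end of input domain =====

-- B replaces A's index loop (for + try/except + inner while + mod0 offset) by a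
-- recursive decomposition: take rev0 up to the first occurrence of the current target,
-- recurse on the slice after it (objective: alternative); equivalence proved on Pre_.

-- ===== PORT A =====
-- inner while loop of A: `while case_copy[0][x+mod0] != case_copy[1][x]: append; mod0+=1`,
-- starting at rev0 index i (= x+mod0), target t (= rev1[x]).
-- Result: (some i', acc') where i' is the index of the first match, or (none, acc') if
-- an IndexError occurred (index ran past rev0) -- the caller then breaks returning acc'.
def pvInnerA (rev0 : List Int) (t : Int) (i : Nat) (acc : List Int) :
    Option Nat × List Int :=
  if _ : i < rev0.length then
    if rev0[i]! ≠ t then pvInnerA rev0 t (i + 1) (acc ++ [rev0[i]!])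
    else (some i, acc)
  else (none, acc)
termination_by rev0.length - i

-- outer for loop of A over rev1, carrying the rev0 index i = x + mod0 and to_move = acc
def pvOuterA (rev0 : List Int) : List Int → Nat → List Int → List Int
  | [], _, acc => acc
  | t :: rest, i, acc =>
    if _ : i < rev0.length then
      if rev0[i]! ≠ t then
        match pvInnerA rev0 t i acc with
        | (none, acc') => acc'                       -- IndexError inside the while → break
        | (some i', acc') => pvOuterA rev0 rest (i' + 1) acc'
      else pvOuterA rev0 rest (i + 1) acc
    else acc        -- IndexError at the `if` check → break

-- case[0] / case[1] raise IndexError when len(case) < 2: that case is outside Pre_.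
-- [::-1] is ported as List.reverse (exact).
def calculate_to_move (case : List (List Int)) : List Int :=
  match case with
  | c0 :: c1 :: _ => pvOuterA c0.reverse c1.reverse 0 []
  | _ => []

-- ===== PORT B =====
-- B's recursive helper go: `t in rev0` → membership, `.index` → PySem.List.index?,
-- slices rev0[:k] / rev0[k+1:] → PySem.List.slice.
def pvGoB : List Int → List Int → List Int
  | _, [] => []
  | rev0, t :: rest =>
    if t ∈ rev0 then
      match PySem.List.index? rev0 t with
      | some k =>
          PySem.List.slice rev0 none (some (k : Int)) ++
            pvGoB (PySem.List.slice rev0 (some ((k : Int) + 1)) none) rest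
      | none => rev0       -- unreachable: guarded by the membership test
    else rev0

def calculate_to_move_alt (case : List (List Int)) : List Int :=
  match PySem.List.pyGet? case 0, PySem.List.pyGet? case 1 with
  | some c0, some c1 => pvGoB c0.reverse c1.reverse
  | _, _ => []

-- ===== PRECONDITION & SPEC =====
-- Pre_ excludes only inputs with fewer than two rows, on which A raises IndexError
-- at case[1] (uncaught, outside the try).
def Pre_calculate_to_move (case : List (List Int)) : Prop := 2 ≤ case.length
instance (case : List (List Int)) : Decidable (Pre_calculate_to_move case) := by
  unfold Pre_calculate_to_move; infer_instance

def pvWitness_calculate_to_move : List (List Int) := [[1, 2, 3], [2, 3]]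

def Spec_calculate_to_move (case : List (List Int)) (out : List Int) : Prop := out = calculate_to_move_alt case
instance (case : List (List Int)) (out : List Int) : Decidable (Spec_calculate_to_move case out) := by unfold Spec_calculate_to_move; infer_instance

-- ===== CLAIM (what is proved, stated in full; the proofs are below) =====
def Claim_equal_calculate_to_move : Prop := ∀ (case : List (List Int)), Dom_calculate_to_move case → Pre_calculate_to_move case → Spec_calculate_to_move case (calculate_to_move case)

-- ===== LEMMAS AND PROOFS =====

-- A's inner while, started at index i, is characterised by the first occurrence of t
-- in the suffix rev0.drop i: it appends the prefix before the match (or the whole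
-- suffix if t does not occur, signalling IndexError with none).
theorem pvInnerA_char (rev0 : List Int) (t : Int) :
    ∀ i acc, pvInnerA rev0 t i acc =
      (match PySem.List.index? (rev0.drop i) t with
       | some k => (some (i + k), acc ++ (rev0.drop i).take k)
       | none => (none, acc ++ rev0.drop i)) := by
  intro i
  induction hm : rev0.length - i using Nat.strong_induction_on generalizing i with
  | _ n ih =>
    intro acc
    rw [pvInnerA]
    by_cases hi : i < rev0.length
    · have hdrop : rev0.drop i = rev0[i] :: rev0.drop (i + 1) :=
        List.drop_eq_getElem_cons hi
      have hbang : rev0[i]! = rev0[i] := getElem!_pos rev0 i hi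
      rw [dif_pos hi, hbang, hdrop]
      by_cases hne : rev0[i] ≠ t
      · rw [if_pos hne, ih _ (by omega) (i + 1) rfl,
          PySem.List.index?_cons_of_ne _ hne]
        cases hidx : PySem.List.index? (rev0.drop (i + 1)) t with
        | none => simp
        | some k =>
          simp only [Option.map_some, List.take_succ_cons, List.append_assoc,
            List.singleton_append, Prod.mk.injEq, Option.some.injEq]
          exact ⟨by omega, trivial⟩
      · rw [if_neg hne]
        have heq : rev0[i] = t := by omega
        rw [heq, PySem.List.index?_cons_self]
        simp
    · rw [dif_neg hi, List.drop_eq_nil_of_le (by omega)]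
      simp [PySem.List.index?]

-- A's outer loop at rev0 index i equals acc ++ B's recursion on the suffix rev0.drop i.
theorem pvOuterA_eq_goB (rev0 : List Int) :
    ∀ (l : List Int) (i : Nat) (acc : List Int),
      pvOuterA rev0 l i acc = acc ++ pvGoB (rev0.drop i) l := by
  intro l
  induction l with
  | nil => intro i acc; simp [pvOuterA, pvGoB]
  | cons t rest ih =>
    intro i acc
    rw [pvOuterA]
    by_cases hi : i < rev0.length
    · have hbang : rev0[i]! = rev0[i] := getElem!_pos rev0 i hi
      rw [dif_pos hi, hbang]
      by_cases hne : rev0[i] ≠ t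
      · rw [if_pos hne, pvInnerA_char]
        cases hidx : PySem.List.index? (rev0.drop i) t with
        | none =>
          have hmem : t ∉ rev0.drop i := by
            rw [← PySem.List.index?_eq_none_iff]; exact hidx
          simp [pvGoB, hmem]
        | some k =>
          have hmem : t ∈ rev0.drop i := by
            rw [← PySem.List.index?_isSome_iff, hidx]; rfl
          rw [pvGoB, if_pos hmem, hidx]
          show pvOuterA rev0 rest (i + k + 1) (acc ++ (rev0.drop i).take k) =
            acc ++ (PySem.List.slice (rev0.drop i) none (some (k : Int)) ++
              pvGoB (PySem.List.slice (rev0.drop i) (some ((k : Int) + 1)) none) rest)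
          rw [ih (i + k + 1), PySem.List.slice_to_natCast]
          have hc : ((k : Int) + 1) = ((k + 1 : Nat) : Int) := by push_cast; ring
          rw [hc, PySem.List.slice_from_natCast, List.drop_drop]
          have hcomm : i + k + 1 = i + (k + 1) := by omega
          rw [hcomm, List.append_assoc]
      · rw [if_neg hne]
        have heq : rev0[i] = t := by omega
        have hdrop : rev0.drop i = rev0[i] :: rev0.drop (i + 1) :=
          List.drop_eq_getElem_cons hi
        have hmem : t ∈ rev0.drop i := by rw [hdrop, heq]; exact List.mem_cons_self
        have hidx : PySem.List.index? (rev0.drop i) t = some 0 := by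
          rw [hdrop, heq, PySem.List.index?_cons_self]
        rw [pvGoB, if_pos hmem, hidx]
        show pvOuterA rev0 rest (i + 1) acc =
          acc ++ (PySem.List.slice (rev0.drop i) none (some ((0 : Nat) : Int)) ++
            pvGoB (PySem.List.slice (rev0.drop i) (some (((0 : Nat) : Int) + 1)) none) rest)
        rw [ih (i + 1), PySem.List.slice_to_natCast]
        have hc : (((0 : Nat) : Int)) + 1 = ((1 : Nat) : Int) := by norm_num
        rw [hc, PySem.List.slice_from_natCast, List.drop_drop]
        simp
    · rw [dif_neg hi, List.drop_eq_nil_of_le (by omega)]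
      simp [pvGoB]

-- ===== VERDICT (by name: the statement is the Claim_ definition above) =====
theorem calculate_to_move_spec : Claim_equal_calculate_to_move := by
  intro case _ hpre
  unfold Spec_calculate_to_move
  match case with
  | c0 :: c1 :: tl =>
    have hb : calculate_to_move_alt (c0 :: c1 :: tl) =
        pvGoB c0.reverse c1.reverse := by
      have h0 : (0 : Int) ≤ (tl.length : Int) + 1 := by positivity
      simp [calculate_to_move_alt, PySem.List.pyGet?, PySem.List.pyIdx?, h0]
    rw [hb, calculate_to_move, pvOuterA_eq_goB c0.reverse c1.reverse 0 []]
    simp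
  | [] => simp [Pre_calculate_to_move] at hpre
  | [_] => simp [Pre_calculate_to_move] at hpre
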